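-- pv_equiv track=rewrite | github.com/gcd0318/pe | l2/pe35.py | cirStr
-- ===== SOURCE A (Python) =====
-- def cirStr(string):
--     s = string
--     l = [s]
--     i = 1
--     while(i < len(s)):
--         c = s[0]
--         s = s.replace(c, '', 1)
--         s = s + c
--         l.append(s)
--         i = i + 1
--     return l
-- ===== SOURCE B (Python) =====
-- def cirStr(string):
--     result = [string[i:] + string[:i] for i in range(len(string))]
--     return result or [string]
-- ===== Notes on version B (the rewrite author's own statement) =====
-- stated objective: simpler
-- what changed: Replaces the stateful while-loop that repeatedly deletes the first character and re-appends it with a direct comprehension computing each rotation by slicing the original at index i, with a fallback making the empty input yield a singleton list as A does.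
import Mathlib
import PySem

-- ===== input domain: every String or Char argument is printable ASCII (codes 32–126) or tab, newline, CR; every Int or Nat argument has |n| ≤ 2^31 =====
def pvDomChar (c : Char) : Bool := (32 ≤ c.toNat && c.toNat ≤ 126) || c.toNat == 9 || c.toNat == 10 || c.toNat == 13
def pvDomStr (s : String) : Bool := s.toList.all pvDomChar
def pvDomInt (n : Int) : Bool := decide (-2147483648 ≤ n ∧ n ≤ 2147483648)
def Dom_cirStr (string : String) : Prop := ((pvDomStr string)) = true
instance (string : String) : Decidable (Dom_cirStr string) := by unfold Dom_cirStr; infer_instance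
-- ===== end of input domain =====

-- B replaces the stateful delete-first-char-and-append while-loop with a direct
-- slicing comprehension over the rotation index (objective: simpler).

-- ===== PORT A =====
-- the while loop: state (s, l, i); `s.replace(c, '', 1)` removes the first
-- occurrence of c (ported by hand via PySem.List.remove?, which is exactly
-- first-occurrence removal; unchanged string if absent, matching Python)
def cirStrLoop (s : List Char) (l : List String) (i : Nat) : List String :=
  if h : i < s.length then
    match s with
    | [] => l   -- unreachable: i < s.length forces s ≠ []
    | c :: rest =>
      let s2 := ((PySem.List.remove? (c :: rest) c).getD (c :: rest)) ++ [c]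
      cirStrLoop s2 (l ++ [String.ofList s2]) (i + 1)
  else l
termination_by s.length - i
decreasing_by simp_all [PySem.List.remove?_cons_self]; omega

def cirStr (string : String) : List String :=
  cirStrLoop string.toList [string] 1

-- ===== PORT B =====
def cirStr_alt (string : String) : List String :=
  let result := (List.range string.toList.length).map (fun i : Nat =>
    String.ofList (PySem.List.slice string.toList (some (i : Int)) none ++
               PySem.List.slice string.toList none (some (i : Int))))
  if result = [] then [string] else result

-- ===== PRECONDITION & SPEC =====
def Spec_cirStr (string : String) (out : List String) : Prop := out = cirStr_alt string
instance (string : String) (out : List String) : Decidable (Spec_cirStr string out) := by unfold Spec_cirStr; infer_instance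

-- ===== CLAIM (what is proved, stated in full; the proofs are below) =====
def Claim_equal_cirStr : Prop := ∀ (string : String), Dom_cirStr string → Spec_cirStr string (cirStr string)

-- ===== LEMMAS AND PROOFS =====
def pvRot (xs : List Char) (j : Nat) : List Char := xs.drop j ++ xs.take j

theorem pvRot_zero (xs : List Char) : pvRot xs 0 = xs := by simp [pvRot]

theorem pvRot_length (xs : List Char) (j : Nat) (h : j ≤ xs.length) :
    (pvRot xs j).length = xs.length := by simp [pvRot]; omega

theorem pvRot_cons (xs : List Char) (j : Nat) (h : j < xs.length) :
    pvRot xs j = xs[j] :: (xs.drop (j + 1) ++ xs.take j) := by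
  unfold pvRot
  rw [List.drop_eq_getElem_cons h]
  rfl

theorem pvRot_succ_eq (xs : List Char) (j : Nat) (h : j < xs.length) :
    (xs.drop (j + 1) ++ xs.take j) ++ [xs[j]] = pvRot xs (j + 1) := by
  unfold pvRot
  rw [List.take_succ, List.getElem?_eq_getElem h]
  simp

theorem cirStrLoop_cons (c : Char) (rest : List Char) (l : List String) (i : Nat)
    (h : i < (c :: rest).length) :
    cirStrLoop (c :: rest) l i =
      cirStrLoop (rest ++ [c]) (l ++ [String.ofList (rest ++ [c])]) (i + 1) := by
  rw [cirStrLoop, dif_pos h]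
  simp [PySem.List.remove?_cons_self]

theorem loop_eq (xs : List Char) : ∀ (d j : Nat) (l : List String),
    xs.length - (j + 1) = d → j ≤ xs.length →
    cirStrLoop (pvRot xs j) l (j + 1) =
      l ++ (List.range' (j + 1) (xs.length - (j + 1))).map (fun i => String.ofList (pvRot xs i)) := by
  intro d
  induction d with
  | zero =>
    intro j l hd hj
    have hne : ¬ j + 1 < (pvRot xs j).length := by rw [pvRot_length xs j hj]; omega
    rw [cirStrLoop, dif_neg hne, hd]
    simp
  | succ d ih =>
    intro j l hd hj
    have hjlt : j < xs.length := by omega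
    rw [pvRot_cons xs j hjlt]
    rw [cirStrLoop_cons _ _ _ _ (by simp; omega)]
    rw [pvRot_succ_eq xs j hjlt]
    rw [ih (j + 1) (l ++ [String.ofList (pvRot xs (j + 1))]) (by omega) (by omega)]
    have hr : List.range' (j + 1) (xs.length - (j + 1)) =
        (j + 1) :: List.range' (j + 2) (xs.length - (j + 2)) := by
      rw [hd]
      have : xs.length - (j + 2) = d := by omega
      rw [this, List.range'_succ]
    rw [hr]
    simp

theorem alt_eq (string : String) :
    cirStr_alt string =
      if string.toList.length = 0 then [string]
      else (List.range string.toList.length).map (fun i => String.ofList (pvRot string.toList i)) := by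
  unfold cirStr_alt
  have hmap : ∀ i : Nat,
      (String.ofList (PySem.List.slice string.toList (some (i : Int)) none ++
                  PySem.List.slice string.toList none (some (i : Int)))) =
      String.ofList (pvRot string.toList i) := by
    intro i
    rw [PySem.List.slice_from_natCast, PySem.List.slice_to_natCast]
    rfl
  simp only [hmap]
  by_cases h : string.toList.length = 0
  · simp [h]
  · have hne : (List.range string.toList.length).map
        (fun i => String.ofList (pvRot string.toList i)) ≠ [] := by
      simp only [ne_eq, List.map_eq_nil_iff, List.range_eq_nil]
      exact h
    rw [if_neg hne, if_neg h]

-- ===== VERDICT (by name: the statement is the Claim_ definition above) =====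
theorem cirStr_spec : Claim_equal_cirStr := by
  intro string _
  unfold Spec_cirStr cirStr
  rw [alt_eq]
  by_cases h : string.toList.length = 0
  · have hx : string.toList = [] := List.length_eq_zero_iff.mp h
    rw [cirStrLoop]
    simp [hx, h]
  · have h1 : 1 ≤ string.toList.length := by omega
    have := loop_eq string.toList (string.toList.length - 1) 0 [string] (by omega) (by omega)
    rw [pvRot_zero] at this
    rw [this]
    have hr : List.range string.toList.length =
        0 :: List.range' 1 (string.toList.length - 1) := by
      rw [List.range_eq_range']
      have : string.toList.length = (string.toList.length - 1) + 1 := by omega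
      rw [this, List.range'_succ]
      simp
    rw [if_neg h, hr]
    simp [pvRot_zero, String.ofList_toList]
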